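-- pv_equiv track=rewrite | github.com/alsmola/graphgrc | src/scripts/generate-framework-backlinks.py | remove_existing_referenced_by
-- ===== SOURCE A (Python) =====
-- def remove_existing_referenced_by(lines, start, end):
--     """Remove any existing 'Referenced By' sections in the range."""
--     new_lines = []
--     skip_until = None
--
--     for i in range(start, end):
--         if skip_until is not None:
--             if i < skip_until:
--                 continue
--             else:
--                 skip_until = None
--
--         if i < len(lines) and ('**Referenced By:**' in lines[i] or lines[i].strip() == '## Referenced By'):
--             # Skip this line and subsequent lines until we hit another heading or end
--             skip_until = end
--             for j in range(i + 1, end):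
--                 if j < len(lines) and (lines[j].startswith('#') or lines[j].strip() == '---'):
--                     skip_until = j
--                     break
--             continue
--
--         if i < len(lines):
--             new_lines.append(lines[i])
--
--     return new_lines
-- ===== SOURCE B (Python) =====
-- def remove_existing_referenced_by(lines, start, end):
--     """Remove any existing 'Referenced By' sections in the range."""
--     out = []
--     skipping = False
--     for i in range(start, end):
--         if skipping:
--             if i < len(lines) and (lines[i].startswith('#') or lines[i].strip() == '---'):
--                 skipping = False
--             else:
--                 continue
--         if i < len(lines) and ('**Referenced By:**' in lines[i] or lines[i].strip() == '## Referenced By'):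
--             skipping = True
--             continue
--         if i < len(lines):
--             out.append(lines[i])
--     return out
-- ===== Notes on version B (the rewrite author's own statement) =====
-- stated objective: simpler
-- what changed: Replaces the skip_until index plus the inner lookahead loop with a single forward pass holding one boolean skipping flag that is cleared when the current line is a heading or '---' and then falls through so that line is re-processed.
import Mathlib
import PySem

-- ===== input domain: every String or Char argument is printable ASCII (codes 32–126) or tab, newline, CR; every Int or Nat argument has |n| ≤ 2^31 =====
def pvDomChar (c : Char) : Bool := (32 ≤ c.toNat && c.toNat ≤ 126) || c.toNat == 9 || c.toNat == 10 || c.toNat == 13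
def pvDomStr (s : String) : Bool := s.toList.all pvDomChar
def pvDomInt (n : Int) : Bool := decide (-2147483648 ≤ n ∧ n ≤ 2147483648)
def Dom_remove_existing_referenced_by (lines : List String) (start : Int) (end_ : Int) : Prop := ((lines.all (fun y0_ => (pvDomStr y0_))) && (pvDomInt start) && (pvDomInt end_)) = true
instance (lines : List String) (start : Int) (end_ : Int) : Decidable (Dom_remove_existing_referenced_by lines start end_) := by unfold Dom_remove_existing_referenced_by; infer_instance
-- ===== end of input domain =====

-- B replaces A's skip_until index plus inner lookahead loop with a single forward pass
-- holding one boolean `skipping` flag (objective: simpler decomposition, same cost).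

-- line tests shared by both ports (they are the same literal string tests in both Pythons)
def pvIsTerm (s : String) : Bool := PySem.Str.startswith s "#" || (PySem.Str.strip s == "---")
def pvIsMark (s : String) : Bool := PySem.Str.isIn "**Referenced By:**" s || (PySem.Str.strip s == "## Referenced By")

-- ===== PORT A =====
-- inner loop: for j in range(i+1, end): if j < len(lines) and (...): skip_until = j; break
-- (lines[j] is read as pyGet? with default ""; under Pre_ the index is always in range)
def pvLookA (lines : List String) (end_ : Int) (j : Int) (fuel : Nat) : Int :=
  match fuel with
  | 0 => end_
  | Nat.succ fuel =>
    if j < (lines.length : Int) && pvIsTerm ((PySem.List.pyGet? lines j).getD "") then j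
    else pvLookA lines end_ (j + 1) fuel

def pvLoopA (lines : List String) (end_ : Int) (fuel : Nat) (i : Int)
    (su : Option Int) (acc : List String) : List String :=
  match fuel with
  | 0 => acc
  | Nat.succ fuel =>
    if (match su with | some k => decide (i < k) | none => false) then
      pvLoopA lines end_ fuel (i + 1) su acc
    else
      let li := (PySem.List.pyGet? lines i).getD ""
      if i < (lines.length : Int) then
        if pvIsMark li then
          pvLoopA lines end_ fuel (i + 1)
            (some (pvLookA lines end_ (i + 1) (end_ - (i + 1)).toNat)) acc
        else pvLoopA lines end_ fuel (i + 1) none (acc ++ [li])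
      else pvLoopA lines end_ fuel (i + 1) none acc

def remove_existing_referenced_by (lines : List String) (start : Int) (end_ : Int) : List String :=
  pvLoopA lines end_ (end_ - start).toNat start none []

-- ===== PORT B =====
def pvLoopB (lines : List String) (end_ : Int) (fuel : Nat) (i : Int)
    (skipping : Bool) (acc : List String) : List String :=
  match fuel with
  | 0 => acc
  | Nat.succ fuel =>
    let li := (PySem.List.pyGet? lines i).getD ""
    let inb : Bool := decide (i < (lines.length : Int))
    if skipping && !(inb && pvIsTerm li) then
      pvLoopB lines end_ fuel (i + 1) true acc
    else if inb && pvIsMark li then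
      pvLoopB lines end_ fuel (i + 1) true acc
    else if inb then
      pvLoopB lines end_ fuel (i + 1) false (acc ++ [li])
    else
      pvLoopB lines end_ fuel (i + 1) false acc

def remove_existing_referenced_by_alt (lines : List String) (start : Int) (end_ : Int) : List String :=
  pvLoopB lines end_ (end_ - start).toNat start false []

-- ===== PRECONDITION & SPEC =====
-- Pre_ excludes exactly the inputs on which Python A raises IndexError:
-- a nonempty range whose first index start is below -len(lines) (lines[start] raises).
def Pre_remove_existing_referenced_by (lines : List String) (start : Int) (end_ : Int) : Prop :=
  end_ ≤ start ∨ -(lines.length : Int) ≤ start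
instance (lines : List String) (start : Int) (end_ : Int) : Decidable (Pre_remove_existing_referenced_by lines start end_) := by unfold Pre_remove_existing_referenced_by; infer_instance

def pvWitness_remove_existing_referenced_by : List String × Int × Int :=
  (["# t", "**Referenced By:** x", "- [a](a.md)", "## Next", "body"], 0, 5)

def Spec_remove_existing_referenced_by (lines : List String) (start : Int) (end_ : Int) (out : List String) : Prop := out = remove_existing_referenced_by_alt lines start end_
instance (lines : List String) (start : Int) (end_ : Int) (out : List String) : Decidable (Spec_remove_existing_referenced_by lines start end_ out) := by unfold Spec_remove_existing_referenced_by; infer_instance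

-- ===== CLAIM (what is proved, stated in full; the proofs are below) =====
def Claim_equal_remove_existing_referenced_by : Prop := ∀ (lines : List String) (start : Int) (end_ : Int), Dom_remove_existing_referenced_by lines start end_ → Pre_remove_existing_referenced_by lines start end_ → Spec_remove_existing_referenced_by lines start end_ (remove_existing_referenced_by lines start end_)

-- ===== LEMMAS AND PROOFS =====

-- the lookahead result is bounded below by its start index (and at most end_ is irrelevant)
lemma pvLookA_lb (lines : List String) (end_ : Int) :
    ∀ (fuel : Nat) (j : Int), j ≤ end_ → fuel = (end_ - j).toNat →
      j ≤ pvLookA lines end_ j fuel := by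
  intro fuel
  induction fuel with
  | zero => intro j hj _; simpa [pvLookA] using hj
  | succ f ih =>
    intro j hj hf
    simp only [pvLookA]
    split
    · exact le_refl j
    · have hjlt : j < end_ := by omega
      have := ih (j + 1) (by omega) (by omega)
      omega

-- one unfolding of the lookahead at a live index
lemma pvLookA_step (lines : List String) (end_ : Int) (j : Int) (h : j < end_) :
    pvLookA lines end_ j (end_ - j).toNat =
      (if j < (lines.length : Int) && pvIsTerm ((PySem.List.pyGet? lines j).getD "") then j
       else pvLookA lines end_ (j + 1) (end_ - (j + 1)).toNat) := by
  have hf : (end_ - j).toNat = ((end_ - (j + 1)).toNat) + 1 := by omega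
  rw [hf]
  simp [pvLookA]

-- the body of A's loop at a fresh (non-skipped) index equals the corresponding B branches
lemma pvBody_eq (lines : List String) (end_ : Int) (f : Nat) (i : Int)
    (ih : ∀ (i : Int) (su : Option Int) (skipping : Bool) (acc : List String),
      f = (end_ - i).toNat →
      (match su with
       | none => skipping = false
       | some k => skipping = true ∧ k = pvLookA lines end_ i (end_ - i).toNat) →
      pvLoopA lines end_ f i su acc = pvLoopB lines end_ f i skipping acc)
    (hf' : f = (end_ - (i + 1)).toNat) (acc : List String) :
    (if i < (lines.length : Int) then
      if pvIsMark ((PySem.List.pyGet? lines i).getD "") then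
        pvLoopA lines end_ f (i + 1)
          (some (pvLookA lines end_ (i + 1) (end_ - (i + 1)).toNat)) acc
      else pvLoopA lines end_ f (i + 1) none (acc ++ [(PySem.List.pyGet? lines i).getD ""])
     else pvLoopA lines end_ f (i + 1) none acc)
    =
    (if (decide (i < (lines.length : Int)) && pvIsMark ((PySem.List.pyGet? lines i).getD "")) = true then
      pvLoopB lines end_ f (i + 1) true acc
     else if decide (i < (lines.length : Int)) = true then
      pvLoopB lines end_ f (i + 1) false (acc ++ [(PySem.List.pyGet? lines i).getD ""])
     else pvLoopB lines end_ f (i + 1) false acc) := by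
  by_cases hin : i < (lines.length : Int)
  · by_cases hm : pvIsMark ((PySem.List.pyGet? lines i).getD "") = true
    · rw [if_pos hin, if_pos hm, if_pos (by simp [hin, hm])]
      exact ih (i + 1) (some _) true acc hf' ⟨rfl, rfl⟩
    · rw [if_pos hin, if_neg hm, if_neg (by simp [hm]), if_pos (by simp [hin])]
      exact ih (i + 1) none false _ hf' rfl
  · rw [if_neg hin, if_neg (by simp [hin]), if_neg (by simp [hin])]
    exact ih (i + 1) none false acc hf' rfl

-- main loop correspondence: skip_until = some k with k = lookahead-from-i  ↔  skipping = true
lemma pvLoop_eq (lines : List String) (end_ : Int) :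
    ∀ (fuel : Nat) (i : Int) (su : Option Int) (skipping : Bool) (acc : List String),
      fuel = (end_ - i).toNat →
      (match su with
       | none => skipping = false
       | some k => skipping = true ∧ k = pvLookA lines end_ i (end_ - i).toNat) →
      pvLoopA lines end_ fuel i su acc = pvLoopB lines end_ fuel i skipping acc := by
  intro fuel
  induction fuel with
  | zero => intro i su skipping acc _ _; simp [pvLoopA, pvLoopB]
  | succ f ih =>
    intro i su skipping acc hf hinv
    have hi : i < end_ := by omega
    have hf' : f = (end_ - (i + 1)).toNat := by omega
    match su, hinv with
    | none, hsk =>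
      subst hsk
      simp only [pvLoopA, pvLoopB, Bool.false_and,
        Bool.false_eq_true, if_false]
      exact pvBody_eq lines end_ f i ih hf' acc
    | some k, ⟨hsk, hk⟩ =>
      subst hsk
      rw [pvLookA_step lines end_ i hi] at hk
      by_cases hterm : (decide (i < (lines.length : Int)) && pvIsTerm ((PySem.List.pyGet? lines i).getD "")) = true
      · -- terminator at i: A clears skip_until (k = i), B clears skipping; both reprocess i
        rw [if_pos hterm] at hk
        subst hk
        simp only [pvLoopA, pvLoopB, lt_irrefl, decide_false, if_false, hterm,
          Bool.not_true, Bool.and_false, Bool.false_eq_true]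
        exact pvBody_eq lines end_ f k ih hf' acc
      · -- no terminator at i: A keeps skipping (i < k), B keeps the flag
        rw [if_neg hterm] at hk
        have hlb : i + 1 ≤ k := hk ▸ pvLookA_lb lines end_ _ (i + 1) (by omega) (by omega)
        have hx : (decide (i < (lines.length : Int)) && pvIsTerm ((PySem.List.pyGet? lines i).getD "")) = false :=
          Bool.eq_false_iff.mpr hterm
        simp only [pvLoopA, pvLoopB]
        rw [if_pos (show decide (i < k) = true by simp; omega)]
        rw [Bool.true_and, hx, Bool.not_false, if_pos rfl]
        exact ih (i + 1) (some k) true acc hf' ⟨rfl, hk⟩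

-- ===== VERDICT (by name: the statement is the Claim_ definition above) =====
theorem remove_existing_referenced_by_spec : Claim_equal_remove_existing_referenced_by := by
  intro lines start end_ _ _
  unfold Spec_remove_existing_referenced_by
  unfold remove_existing_referenced_by remove_existing_referenced_by_alt
  by_cases h : end_ ≤ start
  · have : (end_ - start).toNat = 0 := by omega
    simp [this, pvLoopA, pvLoopB]
  · exact pvLoop_eq lines end_ _ start none false [] (rfl) rfl
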